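-- pv_equiv track=rewrite | github.com/breecummins/SimpleCycles | simplecycles.py | removeCyclicPermutations
-- ===== SOURCE A (Python) =====
-- def notInCyclicPermutations(x,cycle):
--     return x not in [ tuple(list(cycle[n:]) + list(cycle[:n])) for n in range(len(cycle)) ]
--
-- def removeCyclicPermutations(extrema,paths):
--     new_paths = paths.copy()
--     for e in extrema:
--         # check if any existing paths have the same length and set value
--         same_len = [ p for p in new_paths if len(e)==len(p) and set(e)==set(p) ]
--         # if not, then add to path list
--         if not same_len:
--             new_paths.add( e )
--         # if so, then check for cyclic permutations
--         else:
--             different = True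
--             while different and same_len: different = notInCyclicPermutations( e, same_len.pop() )
--             if different: new_paths.add( e )
--     return new_paths
-- ===== SOURCE B (Python) =====
-- def removeCyclicPermutations(extrema, paths):
--     def canon(t):
--         return min(t[i:] + t[:i] for i in range(len(t))) if t else t
--     new_paths = set(paths)
--     seen = {canon(p) for p in paths}
--     for e in extrema:
--         k = canon(e)
--         if k not in seen:
--             seen.add(k)
--             new_paths.add(e)
--     return new_paths
-- ===== Notes on version B (the rewrite author's own statement) =====
-- stated objective: faster
-- what changed: B computes one canonical (lexicographically minimal) rotation key per path and keeps the keys in a set, so each extremum is decided by one O(1) membership test instead of A's rescan of all accumulated paths with a rebuilt rotation list per candidate.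
import Mathlib
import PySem

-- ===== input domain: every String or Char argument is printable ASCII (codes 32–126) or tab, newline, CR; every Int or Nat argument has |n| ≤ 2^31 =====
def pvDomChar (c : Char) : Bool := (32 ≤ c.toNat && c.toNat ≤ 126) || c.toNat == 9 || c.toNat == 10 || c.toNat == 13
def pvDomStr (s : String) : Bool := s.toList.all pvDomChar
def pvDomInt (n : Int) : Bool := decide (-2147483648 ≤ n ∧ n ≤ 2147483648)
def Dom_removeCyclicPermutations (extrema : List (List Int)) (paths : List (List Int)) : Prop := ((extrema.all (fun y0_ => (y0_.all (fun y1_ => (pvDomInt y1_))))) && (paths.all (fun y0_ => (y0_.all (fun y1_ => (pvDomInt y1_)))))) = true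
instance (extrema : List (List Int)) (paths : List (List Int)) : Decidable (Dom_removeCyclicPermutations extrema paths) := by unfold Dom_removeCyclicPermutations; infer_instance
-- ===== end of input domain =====

-- B replaces A's per-extremum rescan of all accumulated paths (rebuilding every rotation list)
-- by one canonical minimal-rotation key per path kept in a set: one membership test per extremum.
-- Python 'paths' is a set of tuples (List of distinct lists here); outputs are compared as sets.


-- ===== PORT A =====
-- x not in [ tuple(list(cycle[n:]) + list(cycle[:n])) for n in range(len(cycle)) ]
def notInCyclicPermutations (x : List Int) (cycle : List Int) : Bool :=
  ! ((List.range cycle.length).map (fun n => cycle.drop n ++ cycle.take n)).contains x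

-- 'while different and same_len: different = notInCyclicPermutations(e, same_len.pop())'
-- pop() takes the LAST element, so the loop walks same_len from the right: recursion on the
-- reversed list (called with same_len.reverse below), stopping as soon as different is False.
def pvWhileA (e : List Int) (same_len_rev : List (List Int)) : Bool :=
  match same_len_rev with
  | [] => true
  | c :: rest => if notInCyclicPermutations e c then pvWhileA e rest else false

-- new_paths is a Python set; iterating it to build same_len uses hash order, but the boolean
-- 'different' does not depend on that order, and the returned set is compared as a set.
def removeCyclicPermutations (extrema : List (List Int)) (paths : List (List Int)) : List (List Int) :=
  let new_paths := paths  -- paths.copy()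
  extrema.foldl (fun new_paths e =>
    let same_len := new_paths.filter (fun p =>
      e.length == p.length && PySem.Set.equal (PySem.Set.ofList e) (PySem.Set.ofList p))
    if same_len.isEmpty then
      PySem.Set.add new_paths e
    else
      let different := pvWhileA e same_len.reverse
      if different then PySem.Set.add new_paths e else new_paths) new_paths

-- ===== PORT B =====
-- canon(t) = min(t[i:] + t[:i] for i in range(len(t))) if t else t  (lexicographic min rotation)
def pvCanon (p : List Int) : List Int :=
  match p with
  | [] => []
  | _ :: _ =>
    (PySem.List.min? ((List.range p.length).map (fun i => p.drop i ++ p.take i)) (fun r => r)).getD p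

def removeCyclicPermutations_alt (extrema : List (List Int)) (paths : List (List Int)) : List (List Int) :=
  let new_paths := paths  -- set(paths): paths is already a set
  let seen : PySem.Set (List Int) := PySem.Set.ofList (paths.map pvCanon)
  (extrema.foldl (fun (st : List (List Int) × PySem.Set (List Int)) e =>
      let k := pvCanon e
      if PySem.Set.contains st.2 k then st
      else (PySem.Set.add st.1 e, PySem.Set.add st.2 k))
    (new_paths, seen)).1

-- ===== PRECONDITION & SPEC =====
def Spec_removeCyclicPermutations (extrema : List (List Int)) (paths : List (List Int)) (out : List (List Int)) : Prop := out = removeCyclicPermutations_alt extrema paths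
instance (extrema : List (List Int)) (paths : List (List Int)) (out : List (List Int)) : Decidable (Spec_removeCyclicPermutations extrema paths out) := by unfold Spec_removeCyclicPermutations; infer_instance

-- ===== CLAIM (what is proved, stated in full; the proofs are below) =====
def Claim_equal_removeCyclicPermutations : Prop := ∀ (extrema : List (List Int)) (paths : List (List Int)), Dom_removeCyclicPermutations extrema paths → Spec_removeCyclicPermutations extrema paths (removeCyclicPermutations extrema paths)

-- ===== LEMMAS AND PROOFS =====

def pvRots (c : List Int) : List (List Int) :=
  (List.range c.length).map (fun n => c.drop n ++ c.take n)

lemma mem_pvRots {x c : List Int} : x ∈ pvRots c ↔ (c ≠ [] ∧ c.IsRotated x) := by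
  constructor
  · rintro h
    simp only [pvRots, List.mem_map, List.mem_range] at h
    obtain ⟨n, hn, rfl⟩ := h
    have hne : c ≠ [] := by
      intro h0; subst h0; simp at hn
    exact ⟨hne, ⟨n, (List.rotate_eq_drop_append_take hn.le).symm ▸ rfl⟩⟩
  · rintro ⟨hne, hr⟩
    obtain ⟨n, hn, hrot⟩ := List.isRotated_iff_mod.mp hr
    rcases lt_or_eq_of_le hn with hlt | heq
    · simp only [pvRots, List.mem_map, List.mem_range]
      exact ⟨n, hlt, by rw [← List.rotate_eq_drop_append_take hn, hrot]⟩
    · subst heq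
      rw [List.rotate_length] at hrot
      simp only [pvRots, List.mem_map, List.mem_range]
      refine ⟨0, ?_, by simpa using hrot⟩
      exact List.length_pos_of_ne_nil hne

lemma pvRots_ne_nil {p : List Int} (h : p ≠ []) : pvRots p ≠ [] := by
  simp only [pvRots, ne_eq, List.map_eq_nil_iff, List.range_eq_nil]
  exact (List.length_pos_of_ne_nil h).ne'

lemma pv_min?_inst (xs : List (List Int)) :
    (@PySem.List.min? (List Int) (List Int) List.instLT (fun a b => a.decidableLT b) xs (fun r => r))
  = (@PySem.List.min? (List Int) (List Int) List.instLinearOrder.toLT LinearOrder.toDecidableLT xs (fun r => r)) := by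
  congr 1

lemma pvCanon_eq_min? {p : List Int} (h : p ≠ []) :
    ∃ m, PySem.List.min? (pvRots p) (fun r => r) = some m ∧ pvCanon p = m := by
  have hne := pvRots_ne_nil h
  rcases hmo : PySem.List.min? (pvRots p) (fun r => r) with _ | m
  · exact absurd ((PySem.List.min?_eq_none_iff _ _).mp hmo) hne
  · refine ⟨m, rfl, ?_⟩
    cases p with
    | nil => exact absurd rfl h
    | cons a t => simpa [pvCanon, pvRots] using congrArg (fun o => o.getD (a :: t)) hmo

lemma pvCanon_mem {p : List Int} (h : p ≠ []) : pvCanon p ∈ pvRots p := by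
  obtain ⟨m, hm, he⟩ := pvCanon_eq_min? h
  exact he ▸ PySem.List.min?_mem hm

lemma pvCanon_min {p : List Int} (h : p ≠ []) : ∀ y ∈ pvRots p, pvCanon p ≤ y := by
  obtain ⟨m, hm, he⟩ := pvCanon_eq_min? h
  intro y hy
  have hm' : (@PySem.List.min? (List Int) (List Int) List.instLinearOrder.toLT
      LinearOrder.toDecidableLT (pvRots p) (fun r => r)) = some m := by
    rw [← pv_min?_inst]; exact hm
  exact he ▸ PySem.List.min?_isMin (key := fun r => r) hm' y hy

lemma pvCanon_length {p : List Int} : (pvCanon p).length = p.length := by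
  cases hp : p with
  | nil => rfl
  | cons a t =>
    have h : p ≠ [] := by simp [hp]
    have := (mem_pvRots.mp (pvCanon_mem h)).2.perm.length_eq
    rw [hp] at this; exact this.symm

lemma pvCanon_nil_iff {p : List Int} : pvCanon p = [] ↔ p = [] := by
  constructor
  · intro h
    have := pvCanon_length (p := p)
    rw [h] at this
    exact List.eq_nil_of_length_eq_zero this.symm
  · rintro rfl; rfl

lemma pvCanon_eq_iff {x c : List Int} : pvCanon x = pvCanon c ↔ x.IsRotated c := by
  constructor
  · intro h
    by_cases hx : x = []
    · subst hx
      have : pvCanon c = [] := by rw [← h]; rfl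
      rw [pvCanon_nil_iff.mp this]
    · have hcx : pvCanon c ≠ [] := by rw [← h]; exact fun hh => hx (pvCanon_nil_iff.mp hh)
      have hc : c ≠ [] := fun hh => hcx (by rw [hh]; rfl)
      have h1 := (mem_pvRots.mp (pvCanon_mem hx)).2
      have h2 := (mem_pvRots.mp (pvCanon_mem hc)).2
      rw [h] at h1
      exact h1.trans h2.symm
  · intro hr
    by_cases hx : x = []
    · subst hx
      have : c = [] := List.eq_nil_of_length_eq_zero (hr.perm.length_eq.symm)
      rw [this]
    · have hc : c ≠ [] := fun hh => hx (List.eq_nil_of_length_eq_zero (by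
        rw [hh] at hr; exact hr.perm.length_eq))
      have m1 : pvCanon x ∈ pvRots c :=
        mem_pvRots.mpr ⟨hc, hr.symm.trans (mem_pvRots.mp (pvCanon_mem hx)).2⟩
      have m2 : pvCanon c ∈ pvRots x :=
        mem_pvRots.mpr ⟨hx, hr.trans (mem_pvRots.mp (pvCanon_mem hc)).2⟩
      exact le_antisymm (pvCanon_min hx _ m2) (pvCanon_min hc _ m1)

lemma pvWhileA_eq_all (e : List Int) (l : List (List Int)) :
    pvWhileA e l = l.all (fun c => notInCyclicPermutations e c) := by
  induction l with
  | nil => rfl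
  | cons c rest ih =>
    simp only [pvWhileA, List.all_cons]
    cases h : notInCyclicPermutations e c <;> simp [ih]

lemma notIn_iff (e p : List Int) :
    notInCyclicPermutations e p = true ↔ ¬ (p ≠ [] ∧ p.IsRotated e) := by
  have : ((List.range p.length).map (fun n => p.drop n ++ p.take n)) = pvRots p := rfl
  simp only [notInCyclicPermutations, this, Bool.not_eq_true', ← Bool.not_eq_true]
  rw [not_iff_not]
  simp only [List.contains_iff_mem]
  exact mem_pvRots

lemma pred_true_of_rot {e p : List Int} (h : p.IsRotated e) :
    (e.length == p.length && PySem.Set.equal (PySem.Set.ofList e) (PySem.Set.ofList p)) = true := by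
  have hp : p.Perm e := h.perm
  have h1 : (e.length == p.length) = true := by simpa using hp.length_eq.symm
  have h2 : (PySem.Set.ofList e).equal (PySem.Set.ofList p) = true := by
    rw [PySem.Set.equal_iff]
    intro x
    rw [PySem.Set.mem_ofList, PySem.Set.mem_ofList]
    exact (hp.mem_iff).symm
  simp [h1, h2]

-- A's decision for one extremum e against the accumulated np, as a proposition
lemma stepA_adds_iff (np : List (List Int)) (e : List Int) :
    (((np.filter (fun p =>
        e.length == p.length && PySem.Set.equal (PySem.Set.ofList e) (PySem.Set.ofList p))).all
      (fun c => notInCyclicPermutations e c)) = true)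
    ↔ (∀ p ∈ np, ¬ (p ≠ [] ∧ p.IsRotated e)) := by
  rw [List.all_eq_true]
  constructor
  · intro H p hp hcon
    have hpred := pred_true_of_rot hcon.2
    have := H p (List.mem_filter.mpr ⟨hp, hpred⟩)
    exact (notIn_iff e p).mp this hcon
  · intro G c hc
    exact (notIn_iff e c).mpr (G c (List.mem_filter.mp hc).1)

lemma set_add_of_mem {s : List (List Int)} {x : List Int} (h : x ∈ s) :
    PySem.Set.add s x = s := by
  simp [PySem.Set.add, PySem.Set.contains_eq_listContains, h]

-- the fold invariant: B's key set holds exactly the canonical keys of the accumulated paths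
def pvInv (np seen : List (List Int)) : Prop := ∀ k, k ∈ seen ↔ ∃ p ∈ np, pvCanon p = k

lemma pv_step_eq (np seen : List (List Int)) (e : List Int) (hinv : pvInv np seen) :
    (let same_len := np.filter (fun p =>
        e.length == p.length && PySem.Set.equal (PySem.Set.ofList e) (PySem.Set.ofList p))
     if same_len.isEmpty then PySem.Set.add np e
     else if pvWhileA e same_len.reverse then PySem.Set.add np e else np)
    = (if PySem.Set.contains seen (pvCanon e) then (np, seen)
       else (PySem.Set.add np e, PySem.Set.add seen (pvCanon e))).1
    ∧ pvInv ((if PySem.Set.contains seen (pvCanon e) then (np, seen)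
       else (PySem.Set.add np e, PySem.Set.add seen (pvCanon e))).1)
            ((if PySem.Set.contains seen (pvCanon e) then (np, seen)
       else (PySem.Set.add np e, PySem.Set.add seen (pvCanon e))).2) := by
  have hseen : pvCanon e ∈ seen ↔ ∃ p ∈ np, p.IsRotated e := by
    rw [hinv]
    constructor
    · rintro ⟨p, hp, hk⟩; exact ⟨p, hp, pvCanon_eq_iff.mp hk⟩
    · rintro ⟨p, hp, hr⟩; exact ⟨p, hp, pvCanon_eq_iff.mpr hr⟩
  -- collapse A's branch structure to a single test
  have hA : (let same_len := np.filter (fun p =>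
        e.length == p.length && PySem.Set.equal (PySem.Set.ofList e) (PySem.Set.ofList p))
     if same_len.isEmpty then PySem.Set.add np e
     else if pvWhileA e same_len.reverse then PySem.Set.add np e else np)
      = (if (np.filter (fun p =>
        e.length == p.length && PySem.Set.equal (PySem.Set.ofList e) (PySem.Set.ofList p))).all
          (fun c => notInCyclicPermutations e c) then PySem.Set.add np e else np) := by
    set sl := np.filter (fun p =>
        e.length == p.length && PySem.Set.equal (PySem.Set.ofList e) (PySem.Set.ofList p)) with hsl
    by_cases he : sl.isEmpty
    · have : sl = [] := List.isEmpty_iff.mp he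
      simp [this]
    · simp [pvWhileA_eq_all, List.all_reverse]
      intro h0
      exact absurd (List.isEmpty_iff.mpr h0) he
  rw [hA]
  by_cases hQ : ∃ p ∈ np, p.IsRotated e
  · -- some accumulated path is a rotation of e: B skips
    have hc : PySem.Set.contains seen (pvCanon e) = true :=
      (PySem.Set.contains_iff _ _).mpr (hseen.mpr hQ)
    rw [hc]
    simp only [if_true]
    refine ⟨?_, hinv⟩
    by_cases hne : e = []
    · -- e = (): the only rotation of e in np is () itself, A re-adds it (a no-op on the set)
      obtain ⟨p, hp, hr⟩ := hQ
      have hpe : p = e := by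
        subst hne
        exact List.eq_nil_of_length_eq_zero hr.perm.length_eq
      have hP : ∀ q ∈ np, ¬ (q ≠ [] ∧ q.IsRotated e) := by
        rintro q hq ⟨hqne, hqr⟩
        exact hqne (by subst hne; exact List.eq_nil_of_length_eq_zero hqr.perm.length_eq)
      rw [if_pos (stepA_adds_iff np e |>.mpr hP)]
      exact set_add_of_mem (hpe ▸ hp)
    · -- e nonempty: A's rotation scan finds that path and rejects e too
      have hP : ¬ ∀ q ∈ np, ¬ (q ≠ [] ∧ q.IsRotated e) := by
        obtain ⟨p, hp, hr⟩ := hQ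
        intro H
        have hpne : p ≠ [] := by
          intro h0
          exact hne (by rw [h0] at hr; exact (List.eq_nil_of_length_eq_zero hr.perm.length_eq.symm))
        exact H p hp ⟨hpne, hr⟩
      rw [if_neg (fun hb => hP ((stepA_adds_iff np e).mp hb))]
  · -- no rotation present: both add e
    have hc : PySem.Set.contains seen (pvCanon e) = false := by
      rw [← Bool.not_eq_true, PySem.Set.contains_iff _ _]
      exact fun h => hQ (hseen.mp h)
    rw [hc]
    simp only [Bool.false_eq_true, if_false]
    have hP : ∀ q ∈ np, ¬ (q ≠ [] ∧ q.IsRotated e) := fun q hq hcon => hQ ⟨q, hq, hcon.2⟩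
    rw [if_pos (stepA_adds_iff np e |>.mpr hP)]
    refine ⟨rfl, ?_⟩
    intro k
    simp only [PySem.Set.mem_add _ _ _]
    constructor
    · rintro (hk | rfl)
      · obtain ⟨p, hp, hpk⟩ := (hinv k).mp hk
        exact ⟨p, Or.inl hp, hpk⟩
      · exact ⟨e, Or.inr rfl, rfl⟩
    · rintro ⟨p, hp | rfl, hpk⟩
      · exact Or.inl ((hinv k).mpr ⟨p, hp, hpk⟩)
      · exact Or.inr hpk.symm

lemma pv_fold_eq (ex : List (List Int)) (np seen : List (List Int)) (hinv : pvInv np seen) :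
    ex.foldl (fun new_paths e =>
      let same_len := new_paths.filter (fun p =>
        e.length == p.length && PySem.Set.equal (PySem.Set.ofList e) (PySem.Set.ofList p))
      if same_len.isEmpty then PySem.Set.add new_paths e
      else if pvWhileA e same_len.reverse then PySem.Set.add new_paths e else new_paths) np
    = (ex.foldl (fun (st : List (List Int) × PySem.Set (List Int)) e =>
        if PySem.Set.contains st.2 (pvCanon e) then st
        else (PySem.Set.add st.1 e, PySem.Set.add st.2 (pvCanon e))) (np, seen)).1 := by
  induction ex generalizing np seen with
  | nil => rfl
  | cons e rest ih =>
    simp only [List.foldl_cons]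
    obtain ⟨heq, hinv'⟩ := pv_step_eq np seen e hinv
    rw [heq]
    rcases h : (if PySem.Set.contains seen (pvCanon e) then (np, seen)
       else (PySem.Set.add np e, PySem.Set.add seen (pvCanon e))) with ⟨np', seen'⟩
    rw [h] at hinv'
    exact ih np' seen' hinv'

-- ===== VERDICT (by name: the statement is the Claim_ definition above) =====
theorem removeCyclicPermutations_spec : Claim_equal_removeCyclicPermutations := by
  intro extrema paths _
  unfold Spec_removeCyclicPermutations removeCyclicPermutations removeCyclicPermutations_alt
  apply pv_fold_eq
  intro k
  rw [PySem.Set.mem_ofList]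
  simp [List.mem_map]
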